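-- pv_equiv track=rewrite | github.com/diyanayakE15/Predictive-Parser | python_backend/app.py | matches_input
-- ===== SOURCE A (Python) =====
-- def matches_input(production, input_symbol, grammar, visited=None):
--     """
--     Recursively check if a production rule (or sequence of symbols) can lead to the input symbol.
--     """
--     if not production:
--         return False # Empty production cannot match input symbol
--
--     if visited is None:
--         visited = set()
--
--     first_symbol = production[0]
--
--     # If the first symbol is a terminal, check for a match with the input symbol
--     if first_symbol == input_symbol:
--         return True
--     # If it's a non-terminal and not yet visited, recursively check each of its productions
--     elif first_symbol in grammar and first_symbol not in visited:
--         visited.add(first_symbol) # Mark this non-terminal as visited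
--         for sub_production in grammar[first_symbol]:
--             if matches_input(sub_production, input_symbol, grammar, visited):
--                 return True
--         visited.remove(first_symbol) # Remove from visited after processing
--
--     # Continue with the next symbol in the production sequence
--     return matches_input(production[1:], input_symbol, grammar, visited)
-- ===== SOURCE B (Python) =====
-- def matches_input(production, input_symbol, grammar, visited=None):
--     """
--     Same result as the recursive backtracking search, computed bottom-up:
--     iterate a monotone 'can lead to input_symbol' set to its fixpoint over the
--     finite alphabet of symbols (O(|syms| * grammar size) instead of exponential
--     backtracking).
--     """
--     blocked = visited if visited is not None else set()
--     syms = set(production)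
--     for rhss in grammar.values():
--         for p in rhss:
--             syms.update(p)
--     good = {c for c in syms if c == input_symbol}
--     for _ in range(len(syms)):
--         good = good | {c for c in syms
--                        if c not in blocked and c in grammar
--                        and any(any(d in good for d in p) for p in grammar[c])}
--     return any(c in good for c in production)
-- ===== Notes on version B (the rewrite author's own statement) =====
-- stated objective: faster
-- what changed: Replaces A's exponential backtracking recursion (per-branch visited set, re-exploring non-terminals on every path) by a bottom-up fixpoint iteration that computes the set of symbols which can lead to the input symbol over the finite symbol alphabet, then tests the production against it.
import Mathlib
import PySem

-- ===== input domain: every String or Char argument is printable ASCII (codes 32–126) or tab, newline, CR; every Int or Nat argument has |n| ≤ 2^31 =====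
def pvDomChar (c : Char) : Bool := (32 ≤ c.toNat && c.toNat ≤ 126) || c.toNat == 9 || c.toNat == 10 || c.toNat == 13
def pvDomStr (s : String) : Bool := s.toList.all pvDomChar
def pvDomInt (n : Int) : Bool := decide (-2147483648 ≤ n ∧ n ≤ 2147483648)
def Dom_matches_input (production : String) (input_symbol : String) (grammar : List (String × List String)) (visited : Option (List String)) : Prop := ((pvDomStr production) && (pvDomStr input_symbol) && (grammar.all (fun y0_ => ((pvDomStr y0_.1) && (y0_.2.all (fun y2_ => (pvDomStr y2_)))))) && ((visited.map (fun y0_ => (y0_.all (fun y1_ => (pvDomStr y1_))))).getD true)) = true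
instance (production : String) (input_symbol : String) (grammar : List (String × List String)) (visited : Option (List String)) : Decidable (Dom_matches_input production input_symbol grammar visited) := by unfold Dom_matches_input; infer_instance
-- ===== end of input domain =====

-- B replaces A's exponential backtracking recursion by a bottom-up fixpoint iteration of the
-- "can lead to input_symbol" set over the finite symbol alphabet; equivalence is about the RETURN
-- value only (Python A may leave extra elements in a caller-supplied `visited` set when it returns True).

-- ===== PORT A =====
def pvToS (c : Char) : String := String.mk [c]

-- helper lemmas cited by pvMatchA's termination proof (decreasing_by)
theorem pvFilterLe {α : Type} (p q : α → Bool) (himp : ∀ x, p x = true → q x = true) :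
    ∀ l : List α, (l.filter p).length ≤ (l.filter q).length := by
  intro l
  induction l with
  | nil => simp
  | cons a l ih =>
    simp only [List.filter_cons]
    cases hp : p a
    · cases hq : q a <;> simp <;> omega
    · rw [himp a hp]
      simpa using ih

theorem pvFilterLt {α : Type} (p q : α → Bool) (himp : ∀ x, p x = true → q x = true) (x : α) :
    ∀ l : List α, x ∈ l → q x = true → p x = false →
      (l.filter p).length < (l.filter q).length := by
  intro l
  induction l with
  | nil => intro h; simp at h
  | cons a l ih =>
    intro hx hq hp
    have hle := pvFilterLe p q himp l
    rcases List.mem_cons.1 hx with rfl | hx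
    · simp only [List.filter_cons, hp, hq]
      simp
      omega
    · have hlt := ih hx hq hp
      simp only [List.filter_cons]
      cases hpa : p a
      · cases hqa : q a <;> simp <;> omega
      · rw [himp a hpa]
        simp
        omega

theorem pvMemKeys {κ ν : Type} [BEq κ] [LawfulBEq κ] (d : PySem.Dict κ ν) (k : κ) (v : ν)
    (h : d.get? k = some v) : k ∈ d.keys := by
  by_contra hk
  have h2 := (PySem.Dict.get?_eq_none_iff_not_mem_keys d k).2 hk
  rw [h2] at h
  exact absurd h (by simp)

theorem pvVisitedLt (keys visited : List String) (fs : String) (hmem : fs ∈ keys)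
    (hnv : visited.contains fs = false) :
    (keys.filter (fun k => !((fs :: visited).contains k))).length <
      (keys.filter (fun k => !(visited.contains k))).length := by
  refine pvFilterLt _ _ ?_ fs keys hmem ?_ ?_
  · intro x hx
    simp only [List.contains_cons, Bool.not_eq_eq_eq_not, Bool.not_true,
      Bool.or_eq_false_iff] at hx
    simpa using hx.2
  · simpa using hnv
  · simp

-- literal port of A: scan the production left to right; on an unvisited non-terminal,
-- try each of its productions with the non-terminal added to `visited` (the Python
-- restores `visited` on a False return, so threading it immutably is exact for the result)
def pvMatchA (g : List (String × List String)) (s : String) :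
    List Char → List String → Bool
  | [], _ => false
  | c :: rest, visited =>
    if pvToS c = s then true
    else
      match h : PySem.Dict.get? (PySem.Dict.ofList g) (pvToS c) with
      | some ps =>
        if hv : visited.contains (pvToS c) = true then
          pvMatchA g s rest visited
        else
          if ps.attach.any (fun p => pvMatchA g s p.1.toList (pvToS c :: visited)) then true
          else pvMatchA g s rest visited
      | none => pvMatchA g s rest visited
  termination_by prod visited =>
    (((PySem.Dict.ofList g).keys.filter (fun k => !(visited.contains k))).length, prod.length)
  decreasing_by
  · exact Prod.Lex.right _ (Nat.lt_succ_self _)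
  · exact Prod.Lex.left _ _
      (pvVisitedLt _ _ _ (pvMemKeys _ _ _ h) (Bool.not_eq_true _ ▸ eq_false_of_ne_true hv))
  · exact Prod.Lex.right _ (Nat.lt_succ_self _)
  · exact Prod.Lex.right _ (Nat.lt_succ_self _)

def matches_input (production : String) (input_symbol : String)
    (grammar : List (String × List String)) (visited : Option (List String)) : Bool :=
  pvMatchA grammar input_symbol production.toList (visited.getD [])

-- ===== PORT B =====
-- c is a candidate symbol: not blocked, a grammar key, and some of its productions contains a good symbol
def pvCond (g : List (String × List String)) (blocked : List String)
    (good : List Char) (c : Char) : Bool :=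
  !(blocked.contains (pvToS c)) &&
  (match PySem.Dict.get? (PySem.Dict.ofList g) (pvToS c) with
   | some ps => ps.any (fun p => p.toList.any (fun d => good.contains d))
   | none => false)

-- good | {c for c in syms if c not in blocked and c in grammar and any(any(d in good …))}
def pvStep (g : List (String × List String)) (blocked : List String)
    (syms : List Char) (good : List Char) : List Char :=
  PySem.Set.union good (syms.filter (pvCond g blocked good))

-- syms = set(production); syms.update(p) for each production p of the grammar
def pvSyms (production : String) (g : List (String × List String)) : List Char :=
  PySem.Set.ofList (production.toList ++
    ((PySem.Dict.ofList g).values.flatMap (fun ps => ps.flatMap (fun p => p.toList))))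

def matches_input_alt (production : String) (input_symbol : String)
    (grammar : List (String × List String)) (visited : Option (List String)) : Bool :=
  let blocked := visited.getD []
  let syms := pvSyms production grammar
  let good0 := syms.filter (fun c => pvToS c == input_symbol)
  let final := (List.range syms.length).foldl
    (fun good _ => pvStep grammar blocked syms good) good0
  production.toList.any (fun c => final.contains c)

-- ===== PRECONDITION & SPEC =====
def Spec_matches_input (production : String) (input_symbol : String) (grammar : List (String × List String)) (visited : Option (List String)) (out : Bool) : Prop := out = matches_input_alt production input_symbol grammar visited
instance (production : String) (input_symbol : String) (grammar : List (String × List String)) (visited : Option (List String)) (out : Bool) : Decidable (Spec_matches_input production input_symbol grammar visited out) := by unfold Spec_matches_input; infer_instance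

-- ===== CLAIM (what is proved, stated in full; the proofs are below) =====
def Claim_equal_matches_input : Prop := ∀ (production : String) (input_symbol : String) (grammar : List (String × List String)) (visited : Option (List String)), Dom_matches_input production input_symbol grammar visited → Spec_matches_input production input_symbol grammar visited (matches_input production input_symbol grammar visited)

-- ===== LEMMAS AND PROOFS =====

-- `pvReach g s V n c`: from symbol c the target s is derivable by a chain of at most n
-- expansions, every expanded symbol being an unblocked grammar key (V fixed throughout)
def pvReach (g : List (String × List String)) (s : String) (V : List String) :
    Nat → Char → Prop
  | 0, c => pvToS c = s
  | n+1, c => pvToS c = s ∨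
      (V.contains (pvToS c) = false ∧
        ∃ ps, PySem.Dict.get? (PySem.Dict.ofList g) (pvToS c) = some ps ∧
          ∃ p ∈ ps, ∃ d ∈ p.toList, pvReach g s V n d)

theorem pvReach_weaken {g : List (String × List String)} {s : String} {V : List String}
    {fs : String} : ∀ (n : Nat) (d : Char),
    pvReach g s (fs :: V) n d → pvReach g s V n d := by
  intro n
  induction n with
  | zero => intro d h; exact h
  | succ n ih =>
    intro d h
    rcases h with h | ⟨hv, ps, hps, p, hp, e, he, hr⟩
    · exact Or.inl h
    · refine Or.inr ⟨?_, ps, hps, p, hp, e, he, ih e hr⟩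
      simp only [List.contains_cons, Bool.or_eq_false_iff] at hv
      exact hv.2

-- A's scan is a disjunction over the symbols of the production
theorem pvMatchA_nil (g : List (String × List String)) (s : String) (V : List String) :
    pvMatchA g s [] V = false := by
  rw [pvMatchA]

theorem pvMatchA_cons_eq (g : List (String × List String)) (s : String) (c : Char)
    (rest : List Char) (V : List String) :
    pvMatchA g s (c :: rest) V =
      (if pvToS c = s then true
       else
         match PySem.Dict.get? (PySem.Dict.ofList g) (pvToS c) with
         | some ps =>
           if V.contains (pvToS c) = true then
             pvMatchA g s rest V
           else
             if ps.attach.any (fun p => pvMatchA g s p.1.toList (pvToS c :: V)) then true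
             else pvMatchA g s rest V
         | none => pvMatchA g s rest V) := by
  rw [pvMatchA]
  by_cases h1 : pvToS c = s
  · simp [h1]
  · simp only [h1, if_false]
    cases hget : PySem.Dict.get? (PySem.Dict.ofList g) (pvToS c) with
    | none => rfl
    | some ps =>
      by_cases hv : pvToS c ∈ V
      · have hv' : V.contains (pvToS c) = true := by simpa using hv
        simp [hv, hv']
      · have hv' : V.contains (pvToS c) = false := by simpa using hv
        simp [hv, hv']

theorem pvMatchA_cons (g : List (String × List String)) (s : String) (c : Char)
    (rest : List Char) (V : List String) :
    pvMatchA g s (c :: rest) V = (pvMatchA g s [c] V || pvMatchA g s rest V) := by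
  rw [pvMatchA_cons_eq, pvMatchA_cons_eq, pvMatchA_nil]
  by_cases h1 : pvToS c = s
  · simp [h1]
  · simp only [h1, if_false]
    cases hget : PySem.Dict.get? (PySem.Dict.ofList g) (pvToS c) with
    | none => simp
    | some ps =>
      by_cases hv : pvToS c ∈ V
      · have hv' : V.contains (pvToS c) = true := by simpa using hv
        simp [hv, hv']
      · have hv' : V.contains (pvToS c) = false := by simpa using hv
        simp only [hv', Bool.false_eq_true, if_false]
        cases hany : ps.attach.any (fun p => pvMatchA g s p.1.toList (pvToS c :: V)) <;>
          simp [hany]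

theorem pvMatchA_any (g : List (String × List String)) (s : String) :
    ∀ (l : List Char) (V : List String),
      pvMatchA g s l V = l.any (fun c => pvMatchA g s [c] V) := by
  intro l
  induction l with
  | nil => intro V; rw [pvMatchA_nil]; rfl
  | cons c rest ih =>
    intro V
    rw [pvMatchA_cons, ih V]
    rfl

-- soundness of A's backtracking search against pvReach
theorem pvA_sound (g : List (String × List String)) (s : String) :
    ∀ (l : List Char) (V : List String), pvMatchA g s l V = true →
      ∃ c ∈ l, ∃ n, pvReach g s V n c := by
  intro l V
  fun_induction pvMatchA g s l V with
  | case1 => simp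
  | case2 c rest visited h1 =>
    exact fun _ => ⟨c, List.mem_cons_self, 0, h1⟩
  | case3 c rest visited h1 ps hget hv ih =>
    intro h
    obtain ⟨d, hd, n, hr⟩ := ih h
    exact ⟨d, List.mem_cons_of_mem c hd, n, hr⟩
  | case4 c rest visited h1 ps hget hv hany ih =>
    intro _
    obtain ⟨p, _, hp⟩ := List.any_eq_true.1 hany
    obtain ⟨d, hd, n, hr⟩ := ih p hp
    refine ⟨c, List.mem_cons_self, n + 1, Or.inr ⟨?_, ps, hget, p.1, p.2, d, hd,
      pvReach_weaken n d hr⟩⟩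
    exact eq_false_of_ne_true hv
  | case5 c rest visited h1 ps hget hv hany ih2 ih =>
    intro h
    obtain ⟨d, hd, n, hr⟩ := ih h
    exact ⟨d, List.mem_cons_of_mem c hd, n, hr⟩
  | case6 c rest visited h1 hget ih =>
    intro h
    obtain ⟨d, hd, n, hr⟩ := ih h
    exact ⟨d, List.mem_cons_of_mem c hd, n, hr⟩

-- a derivation avoiding V either avoids fs := pvToS c as well, or yields a (shorter) derivation of c
theorem pvLift (g : List (String × List String)) (s : String) (V : List String) (c : Char) :
    ∀ (n : Nat) (d : Char), pvReach g s V n d →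
      pvReach g s (pvToS c :: V) n d ∨ ∃ m, m ≤ n ∧ pvReach g s V m c := by
  intro n
  induction n with
  | zero => intro d h; exact Or.inl h
  | succ n ih =>
    intro d h
    rcases h with h | ⟨hv, ps, hps, p, hp, e, he, hr⟩
    · exact Or.inl (Or.inl h)
    · by_cases hc : pvToS d = pvToS c
      · exact Or.inr ⟨n + 1, le_rfl,
          Or.inr ⟨hc ▸ hv, ps, hc ▸ hps, p, hp, e, he, hr⟩⟩
      · rcases ih e hr with h' | ⟨m, hm, hc'⟩
        · refine Or.inl (Or.inr ⟨?_, ps, hps, p, hp, e, he, h'⟩)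
          simp only [List.contains_cons, Bool.or_eq_false_iff]
          refine ⟨?_, hv⟩
          exact beq_eq_false_iff_ne.2 hc
        · exact Or.inr ⟨m, Nat.le_succ_of_le hm, hc'⟩

-- completeness of A's backtracking search against pvReach
theorem pvA_complete (g : List (String × List String)) (s : String) :
    ∀ (n : Nat) (c : Char) (V : List String), pvReach g s V n c →
      pvMatchA g s [c] V = true := by
  intro n
  induction n using Nat.strong_induction_on with
  | _ n ih =>
    intro c V h
    rw [pvMatchA_cons_eq]
    by_cases h1 : pvToS c = s
    · simp [h1]
    · simp only [h1, if_false]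
      match n, h with
      | 0, h => exact absurd h h1
      | m + 1, Or.inl h => exact absurd h h1
      | m + 1, Or.inr ⟨hv, ps, hps, p, hp, d, hd, hr⟩ =>
        rcases pvLift g s V c m d hr with h' | ⟨m', hm', hc'⟩
        · have hbd : pvMatchA g s [d] (pvToS c :: V) = true :=
            ih m (Nat.lt_succ_self m) d (pvToS c :: V) h'
          have hpl : pvMatchA g s p.toList (pvToS c :: V) = true := by
            rw [pvMatchA_any]
            exact List.any_eq_true.2 ⟨d, hd, hbd⟩
          have hany : (ps.attach.any fun q =>
              pvMatchA g s q.1.toList (pvToS c :: V)) = true :=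
            List.any_eq_true.2 ⟨⟨p, hp⟩, List.mem_attach _ _, hpl⟩
          rw [hps]
          have hv' : pvToS c ∉ V := by simpa using hv
          simp [hv', hany]
        · have := ih m' (Nat.lt_succ_of_le hm') c V hc'
          rw [pvMatchA_cons_eq] at this
          simpa [h1] using this

theorem pvA_iff (g : List (String × List String)) (s : String) (l : List Char)
    (V : List String) :
    pvMatchA g s l V = true ↔ ∃ c ∈ l, ∃ n, pvReach g s V n c := by
  constructor
  · exact pvA_sound g s l V
  · rintro ⟨c, hc, n, hr⟩
    rw [pvMatchA_any]
    exact List.any_eq_true.2 ⟨c, hc, pvA_complete g s n c V hr⟩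

-- the iterated step function (the foldl over range in matches_input_alt)
def pvIterN (g : List (String × List String)) (blocked : List String)
    (syms : List Char) (good0 : List Char) : Nat → List Char
  | 0 => good0
  | n+1 => pvStep g blocked syms (pvIterN g blocked syms good0 n)

theorem pvFoldl_range_eq_iterN (g : List (String × List String)) (blocked : List String)
    (syms : List Char) (good0 : List Char) :
    ∀ K : Nat, (List.range K).foldl (fun good _ => pvStep g blocked syms good) good0 =
      pvIterN g blocked syms good0 K := by
  intro K
  induction K with
  | zero => rfl
  | succ K ih =>
    rw [List.range_succ, List.foldl_append, ih]
    rfl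

theorem pvMem_step (g : List (String × List String)) (blocked : List String)
    (syms : List Char) (good : List Char) (c : Char) :
    c ∈ pvStep g blocked syms good ↔
      c ∈ good ∨ (c ∈ syms ∧ pvCond g blocked good c = true) := by
  rw [pvStep, PySem.Set.mem_union]
  simp [List.mem_filter]

theorem pvCond_iff (g : List (String × List String)) (blocked : List String)
    (good : List Char) (c : Char) :
    pvCond g blocked good c = true ↔
      blocked.contains (pvToS c) = false ∧
        ∃ ps, PySem.Dict.get? (PySem.Dict.ofList g) (pvToS c) = some ps ∧
          ∃ p ∈ ps, ∃ d ∈ p.toList, d ∈ good := by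
  rw [pvCond]
  cases hget : PySem.Dict.get? (PySem.Dict.ofList g) (pvToS c) with
  | none =>
    simp only [Bool.and_eq_true, Bool.not_eq_eq_eq_not, Bool.not_true]
    constructor
    · rintro ⟨-, h⟩; exact absurd h (by simp)
    · rintro ⟨-, ps, hps, -⟩; exact absurd hps (by simp [hget])
  | some ps =>
    simp only [Bool.and_eq_true, Bool.not_eq_eq_eq_not, Bool.not_true, List.any_eq_true]
    constructor
    · rintro ⟨hb, p, hp, d, hd, hdm⟩
      exact ⟨hb, ps, rfl, p, hp, d, hd, by simpa using hdm⟩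
    · rintro ⟨hb, ps', hps', p, hp, d, hd, hdm⟩
      cases hps'
      exact ⟨hb, p, hp, d, hd, by simpa using hdm⟩

-- pvCond only depends on the membership of `good`
theorem pvCond_congr (g : List (String × List String)) (blocked : List String)
    (good good' : List Char) (hmem : ∀ x, x ∈ good ↔ x ∈ good') (c : Char) :
    pvCond g blocked good c = pvCond g blocked good' c := by
  cases h' : pvCond g blocked good' c
  · cases h : pvCond g blocked good c
    · rfl
    · obtain ⟨hb, ps, hps, p, hp, d, hd, hdm⟩ := (pvCond_iff g blocked good c).1 h
      rw [(pvCond_iff g blocked good' c).2 ⟨hb, ps, hps, p, hp, d, hd, (hmem d).1 hdm⟩] at h'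
      exact h'.symm ▸ rfl
  · obtain ⟨hb, ps, hps, p, hp, d, hd, hdm⟩ := (pvCond_iff g blocked good' c).1 h'
    exact (pvCond_iff g blocked good c).2 ⟨hb, ps, hps, p, hp, d, hd, (hmem d).2 hdm⟩

theorem pvIterN_mono (g : List (String × List String)) (blocked : List String)
    (syms : List Char) (good0 : List Char) :
    ∀ (K : Nat) (c : Char), c ∈ pvIterN g blocked syms good0 K →
      c ∈ pvIterN g blocked syms good0 (K+1) := by
  intro K c hc
  exact (pvMem_step g blocked syms _ c).2 (Or.inl hc)

theorem pvIterN_le (g : List (String × List String)) (blocked : List String)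
    (syms : List Char) (good0 : List Char) :
    ∀ (j K : Nat), j ≤ K → ∀ c, c ∈ pvIterN g blocked syms good0 j →
      c ∈ pvIterN g blocked syms good0 K := by
  intro j K hjK
  induction hjK with
  | refl => exact fun c hc => hc
  | step _ ih => exact fun c hc => pvIterN_mono g blocked syms good0 _ c (ih c hc)

theorem pvIterN_subset_syms (g : List (String × List String)) (blocked : List String)
    (syms : List Char) (good0 : List Char) (hsub : ∀ c, c ∈ good0 → c ∈ syms) :
    ∀ (K : Nat) (c : Char), c ∈ pvIterN g blocked syms good0 K → c ∈ syms := by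
  intro K
  induction K with
  | zero => exact hsub
  | succ K ih =>
    intro c hc
    rcases (pvMem_step g blocked syms _ c).1 hc with hc | ⟨hc, -⟩
    · exact ih c hc
    · exact hc

theorem pvStep_congr (g : List (String × List String)) (blocked : List String)
    (syms : List Char) (good good' : List Char) (hmem : ∀ x, x ∈ good ↔ x ∈ good') :
    ∀ c, c ∈ pvStep g blocked syms good ↔ c ∈ pvStep g blocked syms good' := by
  intro c
  rw [pvMem_step, pvMem_step, hmem c, pvCond_congr g blocked good good' hmem c]

-- once one iteration adds nothing (membership-wise), all later iterates are equivalent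
theorem pvEquiv_propagate (g : List (String × List String)) (blocked : List String)
    (syms : List Char) (good0 : List Char) (K : Nat)
    (heq : ∀ c, c ∈ pvIterN g blocked syms good0 (K+1) ↔ c ∈ pvIterN g blocked syms good0 K) :
    ∀ j, K ≤ j → ∀ c, c ∈ pvIterN g blocked syms good0 j ↔
      c ∈ pvIterN g blocked syms good0 K := by
  intro j hKj
  induction hKj with
  | refl => exact fun c => Iff.rfl
  | @step j _ ih =>
    intro c
    have h1 : c ∈ pvIterN g blocked syms good0 (j+1) ↔
        c ∈ pvIterN g blocked syms good0 (K+1) :=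
      pvStep_congr g blocked syms _ _ ih c
    exact h1.trans (heq c)

-- if an iteration grows, the count of syms-members strictly increases
theorem pvGrowth (g : List (String × List String)) (blocked : List String)
    (syms : List Char) (good0 : List Char) (hsub : ∀ c, c ∈ good0 → c ∈ syms) (K : Nat)
    (hne : ¬ ∀ c, c ∈ pvIterN g blocked syms good0 (K+1) ↔ c ∈ pvIterN g blocked syms good0 K) :
    (syms.filter (fun c => (pvIterN g blocked syms good0 K).contains c)).length <
      (syms.filter (fun c => (pvIterN g blocked syms good0 (K+1)).contains c)).length := by
  push_neg at hne
  obtain ⟨c, hc⟩ := hne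
  have hc1 : c ∈ pvIterN g blocked syms good0 (K+1) ∧ c ∉ pvIterN g blocked syms good0 K := by
    rcases hc with h | ⟨h2, h1⟩
    · exact h
    · exact absurd (pvIterN_mono g blocked syms good0 K c h1) h2
  refine pvFilterLt _ _ ?_ c syms
    (pvIterN_subset_syms g blocked syms good0 hsub (K+1) c hc1.1) ?_ ?_
  · intro x hx
    simp only [List.contains_iff_mem, decide_eq_true_eq] at hx ⊢
    exact pvIterN_mono g blocked syms good0 K x hx
  · simp [hc1.1]
  · simp [hc1.2]

theorem pvExistsEquiv (g : List (String × List String)) (blocked : List String)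
    (syms : List Char) (good0 : List Char) (hsub : ∀ c, c ∈ good0 → c ∈ syms) :
    ∀ K : Nat,
      (∃ j < K, ∀ c, c ∈ pvIterN g blocked syms good0 (j+1) ↔
        c ∈ pvIterN g blocked syms good0 j) ∨
      K ≤ (syms.filter (fun c => (pvIterN g blocked syms good0 K).contains c)).length := by
  intro K
  induction K with
  | zero => exact Or.inr (Nat.zero_le _)
  | succ K ih =>
    rcases ih with ⟨j, hj, hEq⟩ | hK
    · exact Or.inl ⟨j, Nat.lt_succ_of_lt hj, hEq⟩
    · by_cases hEq : ∀ c, c ∈ pvIterN g blocked syms good0 (K+1) ↔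
          c ∈ pvIterN g blocked syms good0 K
      · exact Or.inl ⟨K, Nat.lt_succ_self K, hEq⟩
      · have := pvGrowth g blocked syms good0 hsub K hEq
        exact Or.inr (by omega)

-- membership stabilises after |syms| iterations
theorem pvFixpoint (g : List (String × List String)) (blocked : List String)
    (syms : List Char) (good0 : List Char) (hsub : ∀ c, c ∈ good0 → c ∈ syms) :
    ∀ c, c ∈ pvIterN g blocked syms good0 (syms.length + 1) ↔
      c ∈ pvIterN g blocked syms good0 syms.length := by
  rcases pvExistsEquiv g blocked syms good0 hsub (syms.length + 1) with ⟨j, hj, hEq⟩ | hK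
  · intro c
    have hjN : j ≤ syms.length := Nat.lt_succ_iff.1 hj
    have h1 := pvEquiv_propagate g blocked syms good0 j hEq (syms.length + 1)
      (Nat.le_succ_of_le hjN) c
    have h2 := pvEquiv_propagate g blocked syms good0 j hEq syms.length hjN c
    exact h1.trans h2.symm
  · exact absurd hK (by
      have := List.length_filter_le
        (fun c => (pvIterN g blocked syms good0 (syms.length + 1)).contains c) syms
      omega)

-- every grammar-production symbol and every production symbol is in pvSyms
theorem pvSyms_closed (production : String) (g : List (String × List String))
    (fs : String) (ps : List String) (p : String) (d : Char)
    (hget : PySem.Dict.get? (PySem.Dict.ofList g) fs = some ps) (hp : p ∈ ps)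
    (hd : d ∈ p.toList) : d ∈ pvSyms production g := by
  rw [pvSyms, PySem.Set.mem_ofList]
  refine List.mem_append_right _ ?_
  refine List.mem_flatMap.2 ⟨ps, ?_, List.mem_flatMap.2 ⟨p, hp, hd⟩⟩
  have hitem : (fs, ps) ∈ (PySem.Dict.ofList g).items :=
    PySem.Dict.mem_items_of_get?_eq_some (d := PySem.Dict.ofList g) hget
  simp only [PySem.Dict.values]
  exact List.mem_map.2 ⟨(fs, ps), hitem, rfl⟩

theorem pvSyms_prod (production : String) (g : List (String × List String)) (c : Char)
    (hc : c ∈ production.toList) : c ∈ pvSyms production g := by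
  rw [pvSyms, PySem.Set.mem_ofList]
  exact List.mem_append_left _ hc

-- B soundness: everything in the iterate is reachable
theorem pvB_sound (production : String) (g : List (String × List String)) (s : String)
    (blocked : List String) :
    ∀ (K : Nat) (c : Char),
      c ∈ pvIterN g blocked (pvSyms production g)
        ((pvSyms production g).filter (fun c => pvToS c == s)) K →
      ∃ n, pvReach g s blocked n c := by
  intro K
  induction K with
  | zero =>
    intro c hc
    have := (List.mem_filter.1 hc).2
    exact ⟨0, by simpa using this⟩
  | succ K ih =>
    intro c hc
    rcases (pvMem_step g blocked _ _ c).1 hc with hc | ⟨-, hcond⟩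
    · exact ih c hc
    · obtain ⟨hb, ps, hps, p, hp, d, hd, hdm⟩ := (pvCond_iff g blocked _ c).1 hcond
      obtain ⟨n, hr⟩ := ih d hdm
      exact ⟨n + 1, Or.inr ⟨hb, ps, hps, p, hp, d, hd, hr⟩⟩

-- B completeness: everything reachable (within syms) is in the final iterate
theorem pvB_complete (production : String) (g : List (String × List String)) (s : String)
    (blocked : List String) :
    ∀ (n : Nat) (c : Char), c ∈ pvSyms production g → pvReach g s blocked n c →
      c ∈ pvIterN g blocked (pvSyms production g)
        ((pvSyms production g).filter (fun c => pvToS c == s))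
        (pvSyms production g).length := by
  have hsub : ∀ c, c ∈ (pvSyms production g).filter (fun c => pvToS c == s) →
      c ∈ pvSyms production g := fun c hc => (List.mem_filter.1 hc).1
  intro n
  induction n with
  | zero =>
    intro c hcs h
    exact pvIterN_le g blocked _ _ 0 _ (Nat.zero_le _) c
      (List.mem_filter.2 ⟨hcs, by simpa using h⟩)
  | succ n ih =>
    intro c hcs h
    rcases h with h | ⟨hb, ps, hps, p, hp, d, hd, hr⟩
    · exact pvIterN_le g blocked _ _ 0 _ (Nat.zero_le _) c
        (List.mem_filter.2 ⟨hcs, by simpa using h⟩)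
    · have hds : d ∈ pvSyms production g :=
        pvSyms_closed production g (pvToS c) ps p d hps hp hd
      have hdG := ih d hds hr
      have hcond : pvCond g blocked
          (pvIterN g blocked (pvSyms production g)
            ((pvSyms production g).filter (fun c => pvToS c == s))
            (pvSyms production g).length) c = true :=
        (pvCond_iff g blocked _ c).2 ⟨hb, ps, hps, p, hp, d, hd, hdG⟩
      have hstep : c ∈ pvIterN g blocked (pvSyms production g)
          ((pvSyms production g).filter (fun c => pvToS c == s))
          ((pvSyms production g).length + 1) :=
        (pvMem_step g blocked _ _ c).2 (Or.inr ⟨hcs, hcond⟩)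
      exact (pvFixpoint g blocked _ _ hsub c).1 hstep

theorem pvB_iff (production : String) (g : List (String × List String)) (s : String)
    (blocked : List String) (c : Char) (hc : c ∈ production.toList) :
    (c ∈ pvIterN g blocked (pvSyms production g)
        ((pvSyms production g).filter (fun c => pvToS c == s))
        (pvSyms production g).length) ↔ ∃ n, pvReach g s blocked n c := by
  constructor
  · exact pvB_sound production g s blocked _ c
  · rintro ⟨n, hr⟩
    exact pvB_complete production g s blocked n c (pvSyms_prod production g c hc) hr

theorem pvMain (production : String) (s : String) (g : List (String × List String))
    (blocked : List String) :
    pvMatchA g s production.toList blocked =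
      production.toList.any (fun c =>
        (pvIterN g blocked (pvSyms production g)
          ((pvSyms production g).filter (fun c => pvToS c == s))
          (pvSyms production g).length).contains c) := by
  rw [Bool.eq_iff_iff, pvA_iff, List.any_eq_true]
  constructor
  · rintro ⟨c, hc, hr⟩
    refine ⟨c, hc, ?_⟩
    simp only [List.contains_iff_mem, decide_eq_true_eq]
    exact (pvB_iff production g s blocked c hc).2 hr
  · rintro ⟨c, hc, hm⟩
    simp only [List.contains_iff_mem, decide_eq_true_eq] at hm
    exact ⟨c, hc, (pvB_iff production g s blocked c hc).1 hm⟩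

-- ===== VERDICT (by name: the statement is the Claim_ definition above) =====
theorem matches_input_spec : Claim_equal_matches_input := by
  intro production input_symbol grammar visited _
  show matches_input production input_symbol grammar visited =
    matches_input_alt production input_symbol grammar visited
  rw [matches_input, matches_input_alt]
  rw [pvFoldl_range_eq_iterN]
  exact pvMain production input_symbol grammar (visited.getD [])
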